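-- pv_equiv track=rewrite | github.com/yjw0817/CHATBOT_SERVER | argos/routers/api.py | keyword_search
-- ===== SOURCE A (Python) =====
-- def keyword_search(query: str, chunks: list, top_k: int = 5) -> list:
--     """Simple keyword-based search scoring."""
--     keywords = set(query.lower().replace("?", "").replace(".", "").split())
--     scored = []
--     for chunk in chunks:
--         text = chunk["chunk_text"].lower()
--         score = sum(1 for kw in keywords if kw in text)
--         if score > 0:
--             scored.append((score, chunk))
--     scored.sort(key=lambda x: -x[0])
--     return [c for _, c in scored[:top_k]]
-- ===== SOURCE B (Python) =====
-- def keyword_search(query: str, chunks: list, top_k: int = 5) -> list: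
--     """Keyword search without sorting: precompute scores, then emit chunks in
--     repeated passes, one pass per score value from the highest possible down."""
--     keywords = set(query.lower().replace("?", "").replace(".", "").split())
--     scores = [sum(kw in chunk["chunk_text"].lower() for kw in keywords) for chunk in chunks]
--     out = []
--     for s in range(len(keywords), 0, -1):
--         for chunk, sc in zip(chunks, scores):
--             if sc == s:
--                 out.append(chunk)
--     return out[:top_k]
-- ===== Notes on version B (the rewrite author's own statement) =====
-- stated objective: alternative
-- what changed: Replaces the collect-then-sort pass (list of (score, chunk) pairs sorted by negative score) with a sort-free multi-pass selection: scores are precomputed once, then for each score value from len(keywords) down to 1 a pass over the chunks emits those with exactly that score, which reproduces the stable descending order and the score>0 filter.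
import Mathlib
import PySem

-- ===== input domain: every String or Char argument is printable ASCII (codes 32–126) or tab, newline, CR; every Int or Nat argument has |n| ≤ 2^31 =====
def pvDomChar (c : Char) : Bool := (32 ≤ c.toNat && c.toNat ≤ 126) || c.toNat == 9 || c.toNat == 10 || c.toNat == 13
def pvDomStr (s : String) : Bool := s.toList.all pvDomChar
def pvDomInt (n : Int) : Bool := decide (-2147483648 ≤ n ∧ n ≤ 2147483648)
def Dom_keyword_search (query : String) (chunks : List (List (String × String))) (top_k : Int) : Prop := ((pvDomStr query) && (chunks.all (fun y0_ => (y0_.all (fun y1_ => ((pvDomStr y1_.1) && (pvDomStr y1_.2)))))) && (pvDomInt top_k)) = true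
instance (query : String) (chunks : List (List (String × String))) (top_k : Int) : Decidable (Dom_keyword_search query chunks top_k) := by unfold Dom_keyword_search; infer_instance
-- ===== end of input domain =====

-- B replaces A's collect-then-sort (stable sort by negative score) with a sort-free
-- multi-pass selection: one pass per score value from the highest down; same return value on Pre_ (alternative decomposition).


-- ===== PORT A =====
def keyword_search (query : String) (chunks : List (List (String × String))) (top_k : Int) : List (List (String × String)) :=
  let keywords := PySem.Set.ofList (PySem.Str.split₀ (PySem.Str.replace (PySem.Str.replace (PySem.Str.lower query) "?" "") "." ""))
  let scored := chunks.foldl (fun acc chunk =>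
    let text := PySem.Str.lower ((PySem.Dict.mk chunk).getD "chunk_text" "")
    let score : Int := keywords.foldl (fun n kw => if PySem.Str.isIn kw text then n + 1 else n) 0
    if score > 0 then acc ++ [(score, chunk)] else acc) []
  let sortedScored := PySem.List.sorted scored (fun x => -x.1) false
  (PySem.List.slice sortedScored none (some top_k)).map (fun c => c.2)

-- ===== PORT B =====
def keyword_search_alt (query : String) (chunks : List (List (String × String))) (top_k : Int) : List (List (String × String)) :=
  let keywords := PySem.Set.ofList (PySem.Str.split₀ (PySem.Str.replace (PySem.Str.replace (PySem.Str.lower query) "?" "") "." ""))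
  let scores : List Int := chunks.map (fun chunk =>
    (keywords.countP (fun kw => PySem.Str.isIn kw (PySem.Str.lower ((PySem.Dict.mk chunk).getD "chunk_text" ""))) : Int))
  let out := (PySem.List.pyRange (keywords.length : Int) 0 (-1)).foldl (fun acc s =>
    (chunks.zip scores).foldl (fun acc2 p => if p.2 == s then acc2 ++ [p.1] else acc2) acc) []
  PySem.List.slice out none (some top_k)

-- ===== PRECONDITION & SPEC =====
-- Pre_ excludes exactly the chunks without a "chunk_text" key, on which A raises KeyError.
def Pre_keyword_search (query : String) (chunks : List (List (String × String))) (top_k : Int) : Prop :=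
  ∀ c ∈ chunks, (PySem.Dict.mk c).contains "chunk_text" = true
instance (query : String) (chunks : List (List (String × String))) (top_k : Int) : Decidable (Pre_keyword_search query chunks top_k) := by unfold Pre_keyword_search; infer_instance
def pvWitness_keyword_search : String × (List (List (String × String))) × Int :=
  ("hi there", [[("chunk_text", "say hi")], [("chunk_text", "nothing")]], 3)
def Spec_keyword_search (query : String) (chunks : List (List (String × String))) (top_k : Int) (out : List (List (String × String))) : Prop := out = keyword_search_alt query chunks top_k
instance (query : String) (chunks : List (List (String × String))) (top_k : Int) (out : List (List (String × String))) : Decidable (Spec_keyword_search query chunks top_k out) := by unfold Spec_keyword_search; infer_instance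

-- ===== CLAIM (what is proved, stated in full; the proofs are below) =====
def Claim_equal_keyword_search : Prop := ∀ (query : String) (chunks : List (List (String × String))) (top_k : Int), Dom_keyword_search query chunks top_k → Pre_keyword_search query chunks top_k → Spec_keyword_search query chunks top_k (keyword_search query chunks top_k)

-- ===== LEMMAS AND PROOFS =====

-- the score both programs assign to a chunk
def ksScore (keywords : List String) (chunk : List (String × String)) : Int :=
  (keywords.countP (fun kw => PySem.Str.isIn kw (PySem.Str.lower ((PySem.Dict.mk chunk).getD "chunk_text" ""))) : Int)

theorem ksScore_le (keywords : List String) (c : List (String × String)) :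
    ksScore keywords c ≤ (keywords.length : Int) := by
  simp only [ksScore, Int.ofNat_le]
  exact List.countP_le_length

-- A's inner scoring loop computes ksScore
theorem scoreA_eq (keywords : List String) (text : String) :
    keywords.foldl (fun n kw => if PySem.Str.isIn kw text then n + 1 else n) (0 : Int)
      = (keywords.countP (fun kw => PySem.Str.isIn kw text) : Int) := by
  rw [PySem.List.foldl_if_add_one]; simp

-- insertBy skips a prefix it never inserts before
theorem insertBy_append_not_before {α : Type} (before : α → α → Bool) (x : α) (l1 l2 : List α)
    (h : ∀ y ∈ l1, before x y = false) :
    PySem.List.insertBy before x (l1 ++ l2) = l1 ++ PySem.List.insertBy before x l2 := by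
  induction l1 with
  | nil => rfl
  | cons y t ih =>
    simp only [List.cons_append, PySem.List.insertBy]
    rw [h y (by simp)]
    simp only [Bool.false_eq_true, if_false, List.cons.injEq, true_and]
    exact ih (fun z hz => h z (by simp [hz]))

theorem insertBy_all_before {α : Type} (before : α → α → Bool) (x : α) (l : List α)
    (h : ∀ y ∈ l, before x y = true) :
    PySem.List.insertBy before x l = x :: l := by
  cases l with
  | nil => rfl
  | cons y t => simp only [PySem.List.insertBy, h y (by simp), if_true]

-- inserting an element of score t into buckets listed in strictly decreasing score order
-- appends it to bucket t
theorem insertBy_flatten (ss : List ℕ) (B : ℕ → List (Int × List (String × String))) (t : ℕ)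
    (hB : ∀ s ∈ ss, ∀ y ∈ B s, y.1 = (s : Int))
    (ht : t ∈ ss) (hdec : ss.Pairwise (fun a b => b < a))
    (x : Int × List (String × String)) (hx : x.1 = (t : Int)) :
    PySem.List.insertBy (fun a b => decide ((-a.1 : Int) < -b.1)) x ((ss.map B).flatten)
      = (ss.map (fun s => B s ++ if s = t then [x] else [])).flatten := by
  induction ss with
  | nil => exact absurd ht (by simp)
  | cons s ss' ih =>
    have hdec' : ∀ b ∈ ss', b < s := fun b hb => (List.pairwise_cons.mp hdec).1 b hb
    simp only [List.map_cons, List.flatten_cons]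
    by_cases hst : s = t
    · subst hst
      rw [insertBy_append_not_before _ _ _ _ (fun y hy => by
        have := hB s (by simp) y hy
        simp [this, hx])]
      rw [insertBy_all_before _ _ _ (fun y hy => by
        rcases List.mem_flatten.mp hy with ⟨l, hl, hyl⟩
        rcases List.mem_map.mp hl with ⟨s', hs', rfl⟩
        have h1 := hB s' (by simp [hs']) y hyl
        have h2 := hdec' s' hs'
        simp only [h1, hx, decide_eq_true_eq]
        omega)]
      have : ss'.map (fun s' => B s' ++ if s' = s then [x] else []) = ss'.map B := by
        apply List.map_congr_left
        intro s' hs'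
        have : s' ≠ s := by have := hdec' s' hs'; omega
        simp [this]
      simp [this]
    · have htt : t ∈ ss' := by
        rcases List.mem_cons.mp ht with h | h
        · exact absurd h.symm hst
        · exact h
      rw [insertBy_append_not_before _ _ _ _ (fun y hy => by
        have h1 := hB s (by simp) y hy
        have h2 : t < s := hdec' t htt
        simp only [h1, hx, decide_eq_false_iff_not]
        omega)]
      rw [ih (fun s' hs' => hB s' (by simp [hs'])) htt (List.pairwise_cons.mp hdec).2]
      simp [hst]

-- the stable sort of a positively-scored, bounded list is the bucket concatenation
theorem stable_sort_buckets (n : ℕ) (xs : List (Int × List (String × String)))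
    (h : ∀ x ∈ xs, 0 < x.1 ∧ x.1 ≤ (n : Int)) :
    PySem.List.sorted xs (fun x => -x.1) false
      = (((List.range (n + 1)).reverse).map
          (fun (s : ℕ) => xs.filter (fun p => p.1 == (s : Int)))).flatten := by
  rw [PySem.List.sorted_eq_foldl_insertBy]
  induction xs using List.reverseRecOn with
  | nil => simp
  | append_singleton ys x ih =>
    have hys : ∀ y ∈ ys, 0 < y.1 ∧ y.1 ≤ (n : Int) := fun y hy => h y (by simp [hy])
    have hx := h x (by simp)
    rw [List.foldl_append, List.foldl_cons, List.foldl_nil, ih hys]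
    have hx1 : x.1 = ((x.1.toNat : ℕ) : Int) := by omega
    rw [insertBy_flatten ((List.range (n + 1)).reverse)
        (fun (s : ℕ) => ys.filter (fun p => p.1 == (s : Int))) x.1.toNat
        (fun s _ y hy => by
          have := List.of_mem_filter hy
          exact eq_of_beq this)
        (by simp [List.mem_reverse, List.mem_range]; omega)
        (by rw [List.pairwise_reverse]; exact List.pairwise_lt_range)
        x hx1]
    apply congrArg
    apply List.map_congr_left
    intro s _
    rw [List.filter_append]
    apply congrArg
    by_cases hst : s = x.1.toNat
    · simp [hst, List.filter, ← hx1]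
    · have : ¬ (x.1 == (s : Int)) = true := by
        simp only [beq_iff_eq]
        omega
      simp [hst, List.filter, this]

-- filtering the (chunk, score) zip on the score and projecting back is filtering on g
theorem zip_filter_fst (g : List (String × String) → Int) (l : List (List (String × String))) (s : Int) :
    ((l.zip (l.map g)).filter (fun p => p.2 == s)).map Prod.fst
      = l.filter (fun c => g c == s) := by
  induction l with
  | nil => rfl
  | cons c t ih =>
    simp only [List.map_cons, List.zip_cons_cons, List.filter_cons]
    by_cases h : g c = s
    · simp [h, ih]
    · simp [h, ih]

-- B's outer loop concatenates one filtered pass per score value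
theorem passes_eq_flatten (ss : List Int) (l : List (List (String × String)))
    (g : List (String × String) → Int) :
    ss.foldl (fun acc s =>
        (l.zip (l.map g)).foldl (fun acc2 p => if p.2 == s then acc2 ++ [p.1] else acc2) acc) []
      = (ss.map (fun s => l.filter (fun c => g c == s))).flatten := by
  have hbody : (fun (acc : List (List (String × String))) s =>
      (l.zip (l.map g)).foldl (fun acc2 p => if p.2 == s then acc2 ++ [p.1] else acc2) acc)
      = fun acc s => acc ++ l.filter (fun c => g c == s) := by
    funext acc s
    rw [PySem.List.foldl_append_if (p := fun p => p.2 == s) (f := Prod.fst), zip_filter_fst]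
  rw [hbody, PySem.List.foldl_append_eq_flatMap]
  simp [List.flatMap_def]

-- the descending nat range with the score>0 filter equals the countdown int range without it
theorem ranges_agree (n : ℕ) (l : List (List (String × String)))
    (g : List (String × String) → Int) :
    (((List.range (n + 1)).reverse).map
        (fun (s : ℕ) => l.filter (fun c => decide (0 < g c) && (g c == (s : Int))))).flatten
      = ((PySem.List.pyRange (n : Int) 0 (-1)).map
          (fun s => l.filter (fun c => g c == s))).flatten := by
  induction n with
  | zero =>
    rw [PySem.List.pyRange_neg_one_eq_nil (by omega)]
    have h1 : (List.range 1).reverse = [0] := rfl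
    rw [h1]
    simp only [List.map_cons, List.map_nil, List.flatten_cons, List.flatten_nil,
      List.append_nil]
    rw [List.filter_eq_nil_iff.mpr]
    intro c _
    simp only [Nat.cast_zero, Bool.and_eq_true, decide_eq_true_eq, beq_iff_eq, not_and]
    omega
  | succ m ih =>
    rw [List.range_succ, List.reverse_append, List.reverse_singleton,
      PySem.List.pyRange_neg_one_cons (by omega)]
    simp only [List.singleton_append, List.map_cons, List.flatten_cons]
    have hc : ((m + 1 : ℕ) : Int) = (m : Int) + 1 := by push_cast; ring
    rw [hc, show (m : Int) + 1 - 1 = (m : Int) from by ring, ih]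
    congr 1
    apply List.filter_congr
    intro c _
    by_cases h : g c = (m : Int) + 1
    · simp only [h, beq_self_eq_true, Bool.and_eq_true, decide_eq_true_eq, and_true]
      omega
    · simp [h]

theorem slice_map {α β : Type} (f : α → β) (xs : List α) (k : Int) :
    PySem.List.slice (xs.map f) none (some k) = (PySem.List.slice xs none (some k)).map f := by
  simp [PySem.List.slice, List.map_take]

-- ===== VERDICT (by name: the statement is the Claim_ definition above) =====
theorem keyword_search_spec : Claim_equal_keyword_search := by
  intro query chunks top_k _hdom _hpre
  unfold Spec_keyword_search keyword_search keyword_search_alt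
  set keywords := PySem.Set.ofList (PySem.Str.split₀ (PySem.Str.replace (PySem.Str.replace (PySem.Str.lower query) "?" "") "." "")) with hkw
  set n := keywords.length with hn
  set g := ksScore keywords with hg
  have hbodyA : (fun (acc : List (Int × List (String × String))) chunk =>
      let text := PySem.Str.lower ((PySem.Dict.mk chunk).getD "chunk_text" "")
      let score : Int := keywords.foldl (fun n kw => if PySem.Str.isIn kw text then n + 1 else n) 0
      if score > 0 then acc ++ [(score, chunk)] else acc)
      = fun acc chunk => if 0 < g chunk then acc ++ [(g chunk, chunk)] else acc := by
    funext acc chunk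
    simp only [scoreA_eq, hg, ksScore, gt_iff_lt]
  have hscores : chunks.map (fun chunk =>
      (keywords.countP (fun kw => PySem.Str.isIn kw (PySem.Str.lower ((PySem.Dict.mk chunk).getD "chunk_text" ""))) : Int))
      = chunks.map g := by
    apply List.map_congr_left
    intro c _
    simp only [hg, ksScore]
  simp only [hbodyA, hscores]
  rw [PySem.List.foldl_append_ite (p := fun c => 0 < g c) (f := fun c => (g c, c)),
      passes_eq_flatten]
  simp only [List.nil_append]
  rw [stable_sort_buckets n ((chunks.filter (fun c => decide (0 < g c))).map (fun c => (g c, c)))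
      (by
        intro x hx
        rcases List.mem_map.mp hx with ⟨c, hc, rfl⟩
        have := List.of_mem_filter hc
        simp only [decide_eq_true_eq] at this
        exact ⟨this, ksScore_le keywords c⟩)]
  rw [← slice_map]
  apply congrArg (fun xs => PySem.List.slice xs none (some top_k))
  rw [← ranges_agree n chunks g]
  rw [List.map_flatten, List.map_map]
  apply congrArg
  apply List.map_congr_left
  intro s _
  simp only [Function.comp_def, List.filter_map, List.map_map]
  rw [List.map_id', List.filter_filter]
  exact List.filter_congr (fun c _ => Bool.and_comm _ _)
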